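-- pv_equiv track=rewrite | github.com/vijaylabx/Password-Cracking-Credential-Attack-Suite | modules/analyzer.py | get_visual_meter
-- ===== SOURCE A (Python) =====
-- def get_visual_meter(score):
--     """Returns an ASCII progress bar representing password strength."""
--     blocks = ["░", "▒", "▓", "█"]
--     meter = ""
--     for i in range(1, 6):
--         if i <= score:
--             meter += "█"
--         else:
--             meter += "░"
--
--     colors = ['\033[91m', '\033[93m', '\033[93m', '\033[92m', '\033[92m']
--     return f"{colors[score-1 if score > 0 else 0]}{meter} ({score}/5)\033[0m"
-- ===== SOURCE B (Python) =====
-- def get_visual_meter(score):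
--     """Returns an ASCII progress bar representing password strength."""
--     n = 0 if score < 0 else (score if score < 5 else 5)
--     table = [
--         ('\033[91m', '\u2591\u2591\u2591\u2591\u2591'),
--         ('\033[91m', '\u2588\u2591\u2591\u2591\u2591'),
--         ('\033[93m', '\u2588\u2588\u2591\u2591\u2591'),
--         ('\033[93m', '\u2588\u2588\u2588\u2591\u2591'),
--         ('\033[92m', '\u2588\u2588\u2588\u2588\u2591'),
--         ('\033[92m', '\u2588\u2588\u2588\u2588\u2588'),
--     ]
--     color, meter = table[n]
--     return f"{color}{meter} ({score}/5)\033[0m"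
-- ===== Notes on version B (the rewrite author's own statement) =====
-- stated objective: simpler
-- what changed: Replaced the per-position loop and separate colors list with a single precomputed six-entry (color, meter) lookup table indexed by the clamped score.
-- outside the precondition, e.g. on get_visual_meter(6): A raises IndexError, B returns '\x1b[92m█████ (6/5)\x1b[0m'
import Mathlib
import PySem

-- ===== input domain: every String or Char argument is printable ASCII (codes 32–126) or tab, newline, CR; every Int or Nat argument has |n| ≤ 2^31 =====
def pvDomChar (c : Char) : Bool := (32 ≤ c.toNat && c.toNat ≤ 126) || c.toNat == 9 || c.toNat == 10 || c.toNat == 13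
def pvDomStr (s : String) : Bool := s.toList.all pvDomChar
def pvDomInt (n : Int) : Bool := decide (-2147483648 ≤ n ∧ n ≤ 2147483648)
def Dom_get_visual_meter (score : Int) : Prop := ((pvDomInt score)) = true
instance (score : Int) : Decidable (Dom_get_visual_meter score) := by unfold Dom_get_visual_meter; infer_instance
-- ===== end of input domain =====

-- B replaces A's per-position loop and colors list with one precomputed (color, meter) lookup table indexed by the clamped score; objective: simpler.
-- Pre_ excludes score ≥ 6, where A raises IndexError (colors[score-1] out of range); B returns the full green bar there.


-- ===== PORT A =====
def get_visual_meter (score : Int) : String :=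
  let meter := (PySem.List.pyRange 1 6 1).foldl
    (fun m i => if i ≤ score then m ++ "█" else m ++ "░") ""
  let colors := ["\x1b[91m", "\x1b[93m", "\x1b[93m", "\x1b[92m", "\x1b[92m"]
  let idx : Int := if score > 0 then score - 1 else 0
  ((PySem.List.pyGet? colors idx).getD "")  -- none = IndexError, excluded by Pre_
    ++ meter ++ " (" ++ PySem.Int.toStr score ++ "/5)" ++ "\x1b[0m"

-- ===== PORT B =====
def get_visual_meter_alt (score : Int) : String :=
  let n : Int := if score < 0 then 0 else if score < 5 then score else 5
  let table : List (String × String) :=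
    [ ("\x1b[91m", "░░░░░"),
      ("\x1b[91m", "█░░░░"),
      ("\x1b[93m", "██░░░"),
      ("\x1b[93m", "███░░"),
      ("\x1b[92m", "████░"),
      ("\x1b[92m", "█████") ]
  let cm := (PySem.List.pyGet? table n).getD ("", "")  -- n ∈ [0,5] always in range
  cm.1 ++ cm.2 ++ " (" ++ PySem.Int.toStr score ++ "/5)" ++ "\x1b[0m"

-- ===== PRECONDITION & SPEC =====
-- Pre_ excludes exactly score ≥ 6, on which A's colors[score-1] raises IndexError.
def Pre_get_visual_meter (score : Int) : Prop := score ≤ 5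
instance (score : Int) : Decidable (Pre_get_visual_meter score) := by unfold Pre_get_visual_meter; infer_instance
def pvWitness_get_visual_meter : Int := 3

def Spec_get_visual_meter (score : Int) (out : String) : Prop := out = get_visual_meter_alt score
instance (score : Int) (out : String) : Decidable (Spec_get_visual_meter score out) := by unfold Spec_get_visual_meter; infer_instance

-- ===== CLAIM (what is proved, stated in full; the proofs are below) =====
def Claim_equal_get_visual_meter : Prop := ∀ (score : Int), Dom_get_visual_meter score → Pre_get_visual_meter score → Spec_get_visual_meter score (get_visual_meter score)

-- ===== LEMMAS AND PROOFS =====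

-- ===== VERDICT (by name: the statement is the Claim_ definition above) =====
theorem get_visual_meter_spec : Claim_equal_get_visual_meter := by
  intro score _ hpre
  unfold Spec_get_visual_meter get_visual_meter get_visual_meter_alt Pre_get_visual_meter at *
  by_cases h1 : score ≤ 0
  · have e : (if score < 0 then (0:Int) else if score < 5 then score else 5) = 0 := by omega
    simp only [e]
    have r : PySem.List.pyRange 1 6 1 = [1,2,3,4,5] := by decide
    rw [r]
    simp only [List.foldl]
    rw [if_neg (by omega), if_neg (by omega), if_neg (by omega), if_neg (by omega), if_neg (by omega),
        if_neg (by omega)]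
    rfl
  · interval_cases score <;> rfl
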